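-- pv_equiv track=rewrite | github.com/pypi-data/pypi-mirror-380 | packages/metis-agent/metis_agent-0.20.0-py3-none-any.whl/metis_agent/tools/core_tools/content_gen_tool.py | _combine_sections
-- ===== SOURCE A (Python) =====
-- from typing import Dict, Any, List, Optional
--
-- def _combine_sections(sections: Dict[str, str], doc_type: str) -> str:
--     """Combine content sections into a complete document."""
--     if doc_type == 'email':
--         return f"{sections.get('subject', '')}\n\n{sections.get('greeting', '')}\n\n{sections.get('body', '')}\n\n{sections.get('closing', '')}"
--     elif doc_type == 'blog_post':
--         return f"# {sections.get('title', '')}\n\n{sections.get('introduction', '')}\n\n{sections.get('body', '')}\n\n{sections.get('conclusion', '')}"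
--     elif doc_type == 'business_report':
--         return f"# {sections.get('title', '')}\n\n{sections.get('executive_summary', '')}\n\n{sections.get('methodology', '')}\n\n{sections.get('findings', '')}\n\n{sections.get('recommendations', '')}"
--     elif doc_type == 'creative_writing':
--         if 'content' in sections:
--             return f"# {sections.get('title', '')}\n\n{sections.get('content', '')}"
--         else:
--             return f"# {sections.get('title', '')}\n\n{sections.get('opening', '')}\n\n{sections.get('development', '')}\n\n{sections.get('climax', '')}\n\n{sections.get('resolution', '')}"
--     else:
--         # Generic combination
--         combined = ""
--         for key, content in sections.items():
--             if content and content.strip():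
--                 combined += f"{content}\n\n"
--         return combined.strip()
-- ===== SOURCE B (Python) =====
-- TEMPLATES = {
--     'email': "{subject}\n\n{greeting}\n\n{body}\n\n{closing}",
--     'blog_post': "# {title}\n\n{introduction}\n\n{body}\n\n{conclusion}",
--     'business_report': "# {title}\n\n{executive_summary}\n\n{methodology}\n\n{findings}\n\n{recommendations}",
--     'creative_writing': "# {title}\n\n{content}",
-- }
-- STAGED_TEMPLATE = "# {title}\n\n{opening}\n\n{development}\n\n{climax}\n\n{resolution}"
--
-- def _render(template, sections):
--     """Tiny template interpolator: '{key}' -> sections.get(key, ''), other chars verbatim."""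
--     out = []
--     i = 0
--     n = len(template)
--     while i < n:
--         if template[i] == '{':
--             j = i + 1
--             while j < n and template[j] != '}':
--                 j += 1
--             out.append(sections.get(template[i + 1:j], ''))
--             i = j + 1
--         else:
--             out.append(template[i])
--             i += 1
--     return ''.join(out)
--
-- def _combine_sections(sections, doc_type):
--     """Combine content sections into a complete document (template interpolation)."""
--     if doc_type == 'creative_writing' and 'content' not in sections:
--         template = STAGED_TEMPLATE
--     else:
--         template = TEMPLATES.get(doc_type)
--     if template is None:
--         return "\n\n".join(v for v in sections.values() if v.strip()).strip()
--     return _render(template, sections)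
-- ===== Notes on version B (the rewrite author's own statement) =====
-- stated objective: alternative
-- what changed: Replaced A's hardcoded per-branch f-strings by literal '{key}' template strings plus a small character-scanning interpolator that substitutes sections.get(key,'') for each placeholder (creative_writing picks its template on 'content' membership); the generic branch joins the stripped-nonempty values with '\n\n' instead of accumulating 'content+\n\n' and stripping the trailing separator.
import Mathlib
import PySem

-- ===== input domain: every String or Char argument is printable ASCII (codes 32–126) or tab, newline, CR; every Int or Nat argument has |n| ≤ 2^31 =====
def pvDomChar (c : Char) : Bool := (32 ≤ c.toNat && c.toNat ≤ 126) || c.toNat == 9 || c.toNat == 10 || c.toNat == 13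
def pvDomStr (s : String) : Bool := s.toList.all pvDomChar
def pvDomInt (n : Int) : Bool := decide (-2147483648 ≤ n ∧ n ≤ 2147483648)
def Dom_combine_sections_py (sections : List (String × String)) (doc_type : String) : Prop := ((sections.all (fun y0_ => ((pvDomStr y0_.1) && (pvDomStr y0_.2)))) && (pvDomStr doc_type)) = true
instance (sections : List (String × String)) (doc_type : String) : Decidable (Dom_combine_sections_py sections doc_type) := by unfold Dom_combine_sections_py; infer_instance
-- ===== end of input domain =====

-- B replaces A's hardcoded per-branch f-strings by literal "{key}" template strings rendered with a
-- small character-scanning interpolator (objective: alternative; same cost, different mechanism).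

-- shared helper: Python dict.get(k, '') on an insertion-ordered association list (first match)
def pvGet (sections : List (String × String)) (k : String) : String :=
  match sections with
  | [] => ""
  | (k', v) :: rest => if k' == k then v else pvGet rest k

-- ===== PORT A =====
def combine_sections_py (sections : List (String × String)) (doc_type : String) : String :=
  if doc_type == "email" then
    pvGet sections "subject" ++ "\n\n" ++ pvGet sections "greeting" ++ "\n\n" ++
      pvGet sections "body" ++ "\n\n" ++ pvGet sections "closing"
  else if doc_type == "blog_post" then
    "# " ++ pvGet sections "title" ++ "\n\n" ++ pvGet sections "introduction" ++ "\n\n" ++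
      pvGet sections "body" ++ "\n\n" ++ pvGet sections "conclusion"
  else if doc_type == "business_report" then
    "# " ++ pvGet sections "title" ++ "\n\n" ++ pvGet sections "executive_summary" ++ "\n\n" ++
      pvGet sections "methodology" ++ "\n\n" ++ pvGet sections "findings" ++ "\n\n" ++
      pvGet sections "recommendations"
  else if doc_type == "creative_writing" then
    if sections.any (fun kv => kv.1 == "content") then
      "# " ++ pvGet sections "title" ++ "\n\n" ++ pvGet sections "content"
    else
      "# " ++ pvGet sections "title" ++ "\n\n" ++ pvGet sections "opening" ++ "\n\n" ++
        pvGet sections "development" ++ "\n\n" ++ pvGet sections "climax" ++ "\n\n" ++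
        pvGet sections "resolution"
  else
    PySem.Str.strip (sections.foldl (fun acc kv =>
      if kv.2 != "" && PySem.Str.strip kv.2 != "" then acc ++ kv.2 ++ "\n\n" else acc) "")

-- ===== PORT B =====
def pvTemplates : PySem.Dict String String :=
  PySem.Dict.mk [
    ("email", "{subject}\n\n{greeting}\n\n{body}\n\n{closing}"),
    ("blog_post", "# {title}\n\n{introduction}\n\n{body}\n\n{conclusion}"),
    ("business_report", "# {title}\n\n{executive_summary}\n\n{methodology}\n\n{findings}\n\n{recommendations}"),
    ("creative_writing", "# {title}\n\n{content}")]

def pvStagedTemplate : String :=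
  "# {title}\n\n{opening}\n\n{development}\n\n{climax}\n\n{resolution}"

-- Source B's _render: scan the template, '{key}' -> sections.get(key, ''), any other char copied verbatim.
-- (Source B's inner index scan "while j < n and template[j] != '}'" is exactly takeWhile/dropWhile on (· != '}'))
def renderL (t : List Char) (sections : List (String × String)) : List Char :=
  match t with
  | [] => []
  | c :: rest =>
    if c == '{' then
      let key := rest.takeWhile (fun d => d != '}')
      let rest' := (rest.dropWhile (fun d => d != '}')).drop 1
      (pvGet sections (String.ofList key)).toList ++ renderL rest' sections
    else c :: renderL rest sections
termination_by t.length
decreasing_by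
  · simp only [List.length_cons]
    have h1 := List.length_dropWhile_le (fun d => d != '}') rest
    have h2 : ((rest.dropWhile (fun d => d != '}')).drop 1).length ≤ (rest.dropWhile (fun d => d != '}')).length := by
      simp
    omega
  · simp

def combine_sections_py_alt (sections : List (String × String)) (doc_type : String) : String :=
  let template : Option String :=
    if doc_type == "creative_writing" && !(sections.any (fun kv => kv.1 == "content")) then
      some pvStagedTemplate
    else pvTemplates.get? doc_type
  match template with
  | none => PySem.Str.strip (PySem.Str.join "\n\n"
      ((sections.map Prod.snd).filter (fun c => PySem.Str.strip c != "")))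
  | some tpl => String.ofList (renderL tpl.toList sections)

-- ===== PRECONDITION & SPEC =====
def Spec_combine_sections_py (sections : List (String × String)) (doc_type : String) (out : String) : Prop := out = combine_sections_py_alt sections doc_type
instance (sections : List (String × String)) (doc_type : String) (out : String) : Decidable (Spec_combine_sections_py sections doc_type out) := by unfold Spec_combine_sections_py; infer_instance

-- ===== CLAIM (what is proved, stated in full; the proofs are below) =====
def Claim_equal_combine_sections_py : Prop := ∀ (sections : List (String × String)) (doc_type : String), Dom_combine_sections_py sections doc_type → Spec_combine_sections_py sections doc_type (combine_sections_py sections doc_type)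

-- ===== LEMMAS AND PROOFS =====

lemma pv_render_email (s : List (String × String)) :
    String.ofList (renderL ("{subject}\n\n{greeting}\n\n{body}\n\n{closing}" : String).toList s)
      = pvGet s "subject" ++ "\n\n" ++ pvGet s "greeting" ++ "\n\n" ++
          pvGet s "body" ++ "\n\n" ++ pvGet s "closing" := by
  apply String.toList_injective
  simp [renderL, String.toList_append]

lemma pv_render_blog (s : List (String × String)) :
    String.ofList (renderL ("# {title}\n\n{introduction}\n\n{body}\n\n{conclusion}" : String).toList s)
      = "# " ++ pvGet s "title" ++ "\n\n" ++ pvGet s "introduction" ++ "\n\n" ++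
          pvGet s "body" ++ "\n\n" ++ pvGet s "conclusion" := by
  apply String.toList_injective
  simp [renderL, String.toList_append]

lemma pv_render_report (s : List (String × String)) :
    String.ofList (renderL ("# {title}\n\n{executive_summary}\n\n{methodology}\n\n{findings}\n\n{recommendations}" : String).toList s)
      = "# " ++ pvGet s "title" ++ "\n\n" ++ pvGet s "executive_summary" ++ "\n\n" ++
          pvGet s "methodology" ++ "\n\n" ++ pvGet s "findings" ++ "\n\n" ++
          pvGet s "recommendations" := by
  apply String.toList_injective
  simp [renderL, String.toList_append]

lemma pv_render_creative (s : List (String × String)) :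
    String.ofList (renderL ("# {title}\n\n{content}" : String).toList s)
      = "# " ++ pvGet s "title" ++ "\n\n" ++ pvGet s "content" := by
  apply String.toList_injective
  simp [renderL, String.toList_append]

lemma pv_render_staged (s : List (String × String)) :
    String.ofList (renderL pvStagedTemplate.toList s)
      = "# " ++ pvGet s "title" ++ "\n\n" ++ pvGet s "opening" ++ "\n\n" ++
          pvGet s "development" ++ "\n\n" ++ pvGet s "climax" ++ "\n\n" ++ pvGet s "resolution" := by
  apply String.toList_injective
  simp [pvStagedTemplate, renderL, String.toList_append]

lemma pv_empty_toList : ("" : String).toList = [] := rfl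

lemma pv_rstrip_append_ws (l sep : List Char) (hws : ∀ c ∈ sep, PySem.Chars.isspace c) :
    PySem.Chars.rstrip (l ++ sep) = PySem.Chars.rstrip l := by
  unfold PySem.Chars.rstrip
  rw [List.reverse_append, List.dropWhile_append]
  have h : sep.reverse.dropWhile PySem.Chars.isspace = [] := by
    rw [List.dropWhile_eq_nil_iff]
    intro c hc; exact hws c (List.mem_reverse.mp hc)
  simp [h]

lemma pv_strip_append_ws (l sep : List Char) (hws : ∀ c ∈ sep, PySem.Chars.isspace c) :
    PySem.Chars.strip (l ++ sep) = PySem.Chars.strip l := by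
  unfold PySem.Chars.strip PySem.Chars.lstrip
  rw [List.dropWhile_append]
  have h : sep.dropWhile PySem.Chars.isspace = [] := by
    rw [List.dropWhile_eq_nil_iff]; exact hws
  by_cases he : (l.dropWhile PySem.Chars.isspace).isEmpty
  · simp [h, List.isEmpty_iff.mp he]
  · simp [he, pv_rstrip_append_ws _ _ hws]

lemma pv_foldl_toList (q : String → Bool) (vals : List String) (a : String) :
    (vals.foldl (fun acc c => if q c then acc ++ c ++ "\n\n" else acc) a).toList
      = vals.foldl (fun acc c => if q c then acc ++ c.toList ++ ("\n\n" : String).toList else acc) a.toList := by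
  induction vals generalizing a with
  | nil => rfl
  | cons x xs ih =>
    simp only [List.foldl_cons]
    by_cases h : q x
    · simp [h, ih]
    · simp [h, ih]

lemma pv_foldl_flatten (q : String → Bool) (sep : List Char) (vals : List String) (a : List Char) :
    vals.foldl (fun acc c => if q c then acc ++ c.toList ++ sep else acc) a
      = a ++ ((vals.filter q).map (fun c => String.toList c ++ sep)).flatten := by
  induction vals generalizing a with
  | nil => simp
  | cons x xs ih =>
    rw [List.foldl_cons, List.filter_cons]
    by_cases h : q x
    · rw [if_pos h, if_pos h, ih, List.map_cons, List.flatten_cons]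
      simp [List.append_assoc]
    · rw [if_neg h, if_neg h, ih]

lemma pv_flatten_join (sep : List Char) (parts : List (List Char)) (hne : parts ≠ []) :
    (parts.map (· ++ sep)).flatten = PySem.Chars.join sep parts ++ sep := by
  induction parts with
  | nil => exact absurd rfl hne
  | cons x xs ih =>
    cases xs with
    | nil => simp [PySem.Chars.join_singleton]
    | cons y ys =>
      rw [List.map_cons, List.flatten_cons, ih (by simp), PySem.Chars.join_cons_cons]
      simp [List.append_assoc]

lemma pv_strip_flatten_eq_strip_join (sep : List Char) (parts : List (List Char))
    (hws : ∀ c ∈ sep, PySem.Chars.isspace c) :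
    PySem.Chars.strip ((parts.map (· ++ sep)).flatten) = PySem.Chars.strip (PySem.Chars.join sep parts) := by
  cases parts with
  | nil => simp [PySem.Chars.join_nil]
  | cons x xs => rw [pv_flatten_join _ _ (by simp), pv_strip_append_ws _ _ hws]

lemma pv_cond_eq (c : String) :
    (c != "" && PySem.Str.strip c != "") = (PySem.Str.strip c != "") := by
  by_cases hc : c = ""
  · subst hc
    have hs : PySem.Str.strip "" = "" := rfl
    simp [hs]
  · simp [hc]

lemma pv_nn_ws : ∀ c ∈ ("\n\n" : String).toList, PySem.Chars.isspace c := by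
  rw [show ("\n\n" : String).toList = ['\n','\n'] from rfl]
  intro c hc; fin_cases hc <;> rfl

lemma pv_generic (vals : List String) :
    PySem.Str.strip (vals.foldl (fun acc c =>
        if PySem.Str.strip c != "" then acc ++ c ++ "\n\n" else acc) "")
      = PySem.Str.strip (PySem.Str.join "\n\n" (vals.filter (fun c => PySem.Str.strip c != ""))) := by
  apply String.toList_injective
  rw [PySem.Str.toList_strip, PySem.Str.toList_strip, PySem.Str.toList_join,
    pv_foldl_toList, pv_foldl_flatten, pv_empty_toList, List.nil_append]
  have hmm : (vals.filter (fun c => PySem.Str.strip c != "")).map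
        (fun c => String.toList c ++ ("\n\n" : String).toList)
      = ((vals.filter (fun c => PySem.Str.strip c != "")).map String.toList).map
        (· ++ ("\n\n" : String).toList) := by
    rw [List.map_map]; rfl
  rw [hmm]
  exact pv_strip_flatten_eq_strip_join _ _ pv_nn_ws

-- ===== VERDICT (by name: the statement is the Claim_ definition above) =====
theorem combine_sections_py_spec : Claim_equal_combine_sections_py := by
  intro sections doc_type _
  unfold Spec_combine_sections_py combine_sections_py combine_sections_py_alt
  by_cases h1 : doc_type = "email"
  · subst h1
    norm_num [pvTemplates, PySem.Dict.get?_mk_cons]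
    exact (pv_render_email sections).symm
  · by_cases h2 : doc_type = "blog_post"
    · subst h2
      norm_num [pvTemplates, PySem.Dict.get?_mk_cons]
      exact (pv_render_blog sections).symm
    · by_cases h3 : doc_type = "business_report"
      · subst h3
        norm_num [pvTemplates, PySem.Dict.get?_mk_cons]
        exact (pv_render_report sections).symm
      · by_cases h4 : doc_type = "creative_writing"
        · subst h4
          by_cases hc : sections.any (fun kv => kv.1 == "content")
          · norm_num [hc, pvTemplates, PySem.Dict.get?_mk_cons]
            exact (pv_render_creative sections).symm
          · norm_num [hc, pvTemplates, PySem.Dict.get?_mk_cons]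
            exact (pv_render_staged sections).symm
        · have e1 : (doc_type == "email") = false := by simp [h1]
          have e2 : (doc_type == "blog_post") = false := by simp [h2]
          have e3 : (doc_type == "business_report") = false := by simp [h3]
          have e4 : (doc_type == "creative_writing") = false := by simp [h4]
          have f1 : ("email" == doc_type) = false := by simp [Ne.symm h1]
          have f2 : ("blog_post" == doc_type) = false := by simp [Ne.symm h2]
          have f3 : ("business_report" == doc_type) = false := by simp [Ne.symm h3]
          have f4 : ("creative_writing" == doc_type) = false := by simp [Ne.symm h4]
          simp only [pvTemplates, PySem.Dict.get?_mk_cons, e1, e2, e3, e4, f1, f2, f3, f4,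
            Bool.false_and, Bool.false_eq_true, if_false]
          have hcond : (fun (acc : String) (kv : String × String) =>
              if kv.2 != "" && PySem.Str.strip kv.2 != "" then acc ++ kv.2 ++ "\n\n" else acc)
            = fun acc kv => if PySem.Str.strip kv.2 != "" then acc ++ kv.2 ++ "\n\n" else acc := by
            funext acc kv; rw [pv_cond_eq]
          rw [hcond]
          have hmap : sections.foldl (fun acc kv =>
              if PySem.Str.strip kv.2 != "" then acc ++ kv.2 ++ "\n\n" else acc) ""
            = (sections.map Prod.snd).foldl (fun acc c =>
              if PySem.Str.strip c != "" then acc ++ c ++ "\n\n" else acc) "" := by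
            rw [List.foldl_map]
          rw [hmap, pv_generic (sections.map Prod.snd)]
          simp [PySem.Dict.get?]
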